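-- pv_equiv track=rewrite | github.com/alexschroeter/bench-ARK | src/bench_ark/core/visualizations.py | _sort_devices_by_type
-- ===== SOURCE A (Python) =====
-- def _sort_devices_by_type(device_keys, flavour_devices):
--     """Sort devices with CPU first (dotted lines), then GPU (solid lines)."""
--     cpu_devices = []
--     gpu_devices = []
--
--     for device_key in device_keys:
--         device_data_list = flavour_devices[device_key]
--         if device_data_list:
--             device_type = device_data_list[0].get('device_type', 'unknown').lower()
--             if device_type == 'cpu':
--                 cpu_devices.append(device_key)
--             else:
--                 # All non-CPU devices (gpu, xpu, cuda, hip, rocm, etc.) go to GPU list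
--                 gpu_devices.append(device_key)
--
--     # Sort within each category and return CPU devices first, then GPU devices
--     return sorted(cpu_devices) + sorted(gpu_devices)
-- ===== SOURCE B (Python) =====
-- def _sort_devices_by_type(device_keys, flavour_devices):
--     """Sort devices with CPU first (dotted lines), then GPU (solid lines)."""
--     present = [dk for dk in device_keys if flavour_devices[dk]]
--     return sorted(
--         present,
--         key=lambda dk: (
--             0 if flavour_devices[dk][0].get('device_type', 'unknown').lower() == 'cpu' else 1,
--             dk,
--         ),
--     )
-- ===== Notes on version B (the rewrite author's own statement) =====
-- stated objective: idiomatic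
-- what changed: Replaces the explicit CPU/GPU two-list partition followed by two separate sorts with a filter plus a single keyed sort whose tuple key (cpu-rank, key) yields the same CPU-first, lexicographic-within-group order.
import Mathlib
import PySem

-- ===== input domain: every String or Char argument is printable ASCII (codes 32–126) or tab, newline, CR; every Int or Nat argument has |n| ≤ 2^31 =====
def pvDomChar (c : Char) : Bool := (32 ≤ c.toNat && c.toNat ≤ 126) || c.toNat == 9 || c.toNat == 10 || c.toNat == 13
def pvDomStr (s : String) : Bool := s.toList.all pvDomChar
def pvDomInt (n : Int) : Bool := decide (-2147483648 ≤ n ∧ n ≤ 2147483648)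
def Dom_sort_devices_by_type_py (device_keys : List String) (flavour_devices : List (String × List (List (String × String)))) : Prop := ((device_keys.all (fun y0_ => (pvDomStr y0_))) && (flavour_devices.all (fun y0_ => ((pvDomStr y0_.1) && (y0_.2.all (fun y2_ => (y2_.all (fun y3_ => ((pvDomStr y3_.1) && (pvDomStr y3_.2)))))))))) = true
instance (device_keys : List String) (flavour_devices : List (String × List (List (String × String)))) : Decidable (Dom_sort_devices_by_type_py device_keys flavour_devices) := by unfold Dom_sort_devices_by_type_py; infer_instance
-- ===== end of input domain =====

-- B replaces A's two-list partition + two sorts by a filter and a single keyed sort (idiomatic); same cost.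

-- shared transliterations of shared Python expressions
-- flavour_devices[dk] (dict lookup, first match; total via default — Pre_ guarantees the key is present)
def pvLookup (flavour_devices : List (String × List (List (String × String)))) (k : String) : List (List (String × String)) :=
  PySem.Dict.getD (PySem.Dict.mk flavour_devices) k []
-- device_data_list[0].get('device_type', 'unknown').lower()
def pvDevTypeLower (row : List (String × String)) : String :=
  PySem.Str.lower (PySem.Dict.getD (PySem.Dict.mk row) "device_type" "unknown")

-- ===== PORT A =====
def sort_devices_by_type_py (device_keys : List String) (flavour_devices : List (String × List (List (String × String)))) : List String :=
  let acc := device_keys.foldl (fun (acc : List String × List String) device_key =>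
    match pvLookup flavour_devices device_key with
    | [] => acc
    | row :: _ =>
      if pvDevTypeLower row = "cpu" then (acc.1 ++ [device_key], acc.2)
      else (acc.1, acc.2 ++ [device_key])) ([], [])
  PySem.List.sorted acc.1 (fun x => x) false ++ PySem.List.sorted acc.2 (fun x => x) false

-- ===== PORT B =====
-- the tuple key's first component: 0 for cpu, 1 otherwise (B only applies it to keys with non-empty lookup)
def pvRank (flavour_devices : List (String × List (List (String × String)))) (k : String) : Int :=
  match pvLookup flavour_devices k with
  | [] => 1
  | row :: _ => if pvDevTypeLower row = "cpu" then 0 else 1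

def sort_devices_by_type_py_alt (device_keys : List String) (flavour_devices : List (String × List (List (String × String)))) : List String :=
  let present := device_keys.filter (fun dk => pvLookup flavour_devices dk ≠ [])
  PySem.List.sorted2 present (fun dk => pvRank flavour_devices dk) (fun dk => dk) false

-- ===== PRECONDITION & SPEC =====
-- Pre_ excludes exactly the inputs where some device_key is missing from flavour_devices (Python A raises KeyError there).
def Pre_sort_devices_by_type_py (device_keys : List String) (flavour_devices : List (String × List (List (String × String)))) : Prop :=
  device_keys.all (fun dk => (PySem.Dict.mk flavour_devices).contains dk) = true
instance (device_keys : List String) (flavour_devices : List (String × List (List (String × String)))) : Decidable (Pre_sort_devices_by_type_py device_keys flavour_devices) := by unfold Pre_sort_devices_by_type_py; infer_instance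

def pvWitness_sort_devices_by_type_py : List String × (List (String × List (List (String × String)))) :=
  (["b", "a"], [("a", [[("device_type", "GPU")]]), ("b", [[("device_type", "cpu")]])])

def Spec_sort_devices_by_type_py (device_keys : List String) (flavour_devices : List (String × List (List (String × String)))) (out : List String) : Prop := out = sort_devices_by_type_py_alt device_keys flavour_devices
instance (device_keys : List String) (flavour_devices : List (String × List (List (String × String)))) (out : List String) : Decidable (Spec_sort_devices_by_type_py device_keys flavour_devices out) := by unfold Spec_sort_devices_by_type_py; infer_instance

-- ===== CLAIM (what is proved, stated in full; the proofs are below) =====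
def Claim_equal_sort_devices_by_type_py : Prop := ∀ (device_keys : List String) (flavour_devices : List (String × List (List (String × String)))), Dom_sort_devices_by_type_py device_keys flavour_devices → Pre_sort_devices_by_type_py device_keys flavour_devices → Spec_sort_devices_by_type_py device_keys flavour_devices (sort_devices_by_type_py device_keys flavour_devices)


-- ===== LEMMAS AND PROOFS =====

-- the lexicographic key realised by B's tuple key (0/1 cpu-rank, then the key itself)
def pvKey (flavour_devices : List (String × List (List (String × String)))) (k : String) : Int ×ₗ String :=
  toLex (pvRank flavour_devices k, k)

lemma pvKey_injective (fd : List (String × List (List (String × String)))) : Function.Injective (pvKey fd) := by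
  intro a b h
  have := congrArg (fun p => (ofLex p).2) h
  simpa [pvKey] using this

lemma pvRank_eq_zero_or_one (fd : List (String × List (List (String × String)))) (k : String) :
    pvRank fd k = 0 ∨ pvRank fd k = 1 := by
  unfold pvRank
  rcases pvLookup fd k with _ | ⟨row, rest⟩
  · right; rfl
  · by_cases h : pvDevTypeLower row = "cpu" <;> simp [h]

-- sorted2 with an Int first key and a String second key is sorted by the lexicographic key
lemma sorted2_eq_sorted_key {α : Type} (xs : List α) (k1 : α → Int) (k2 : α → String)
    (key : α → Int ×ₗ String) (hkey : ∀ a, key a = toLex (k1 a, k2 a)) :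
    PySem.List.sorted2 xs k1 k2 false = PySem.List.sorted xs key false := by
  unfold PySem.List.sorted2 PySem.List.sorted
  have h : (fun a b => decide (k1 a < k1 b) || (!decide (k1 b < k1 a) && decide (k2 a < k2 b)))
      = fun a b => decide (key a < key b) := by
    funext a b
    simp only [hkey, Prod.Lex.toLex_lt_toLex]
    rcases lt_trichotomy (k1 a) (k1 b) with h | h | h
    · simp [h, not_lt_of_gt h]
    · simp [h]
    · simp [not_lt_of_gt h, h, h.ne']
  simp only [Bool.false_eq_true, if_false, h]

-- A's accumulating loop builds the two filters of the input list
lemma foldl_partition (fd : List (String × List (List (String × String)))) :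
    ∀ (xs : List String) (c g : List String),
      xs.foldl (fun (acc : List String × List String) device_key =>
        match pvLookup fd device_key with
        | [] => acc
        | row :: _ =>
          if pvDevTypeLower row = "cpu" then (acc.1 ++ [device_key], acc.2)
          else (acc.1, acc.2 ++ [device_key])) (c, g)
      = (c ++ xs.filter (fun k => decide (pvRank fd k = 0) && decide (pvLookup fd k ≠ [])),
         g ++ xs.filter (fun k => !decide (pvRank fd k = 0) && decide (pvLookup fd k ≠ []))) := by
  intro xs
  induction xs with
  | nil => intro c g; simp
  | cons x xs ih =>
    intro c g
    rcases hL : pvLookup fd x with _ | ⟨row, rest⟩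
    · simp [List.foldl_cons, hL, ih, pvRank]
    · by_cases hc : pvDevTypeLower row = "cpu" <;>
        simp [List.foldl_cons, hL, hc, ih, pvRank]

lemma rank_of_mem_cpu (fd : List (String × List (List (String × String)))) (xs : List String) (a : String)
    (ha : a ∈ xs.filter (fun k => decide (pvRank fd k = 0) && decide (pvLookup fd k ≠ []))) :
    pvRank fd a = 0 := by
  have := List.of_mem_filter ha
  simp only [Bool.and_eq_true, decide_eq_true_eq] at this
  exact this.1

lemma rank_of_mem_gpu (fd : List (String × List (List (String × String)))) (xs : List String) (a : String)
    (ha : a ∈ xs.filter (fun k => !decide (pvRank fd k = 0) && decide (pvLookup fd k ≠ []))) :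
    pvRank fd a = 1 := by
  have := List.of_mem_filter ha
  rcases pvRank_eq_zero_or_one fd a with h | h
  · exfalso; simp [h] at this
  · exact h

-- ===== VERDICT (by name: the statement is the Claim_ definition above) =====
theorem sort_devices_by_type_py_spec : Claim_equal_sort_devices_by_type_py := by
  intro dk fd _hdom _hpre
  unfold Spec_sort_devices_by_type_py sort_devices_by_type_py sort_devices_by_type_py_alt
  rw [foldl_partition fd dk [] []]
  set cpu := dk.filter (fun k => decide (pvRank fd k = 0) && decide (pvLookup fd k ≠ [])) with hcpu
  set gpu := dk.filter (fun k => !decide (pvRank fd k = 0) && decide (pvLookup fd k ≠ [])) with hgpu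
  set present := dk.filter (fun d => decide (pvLookup fd d ≠ [])) with hpres
  rw [sorted2_eq_sorted_key present (fun d => pvRank fd d) (fun d => d) (pvKey fd) (fun a => rfl)]
  simp only [List.nil_append]
  refine PySem.List.eq_of_perm_of_pairwise_le_of_injective (pvKey fd) (pvKey_injective fd) ?_ ?_ ?_
  · -- permutation
    have h1 : cpu = present.filter (fun k => decide (pvRank fd k = 0)) := by
      rw [hpres, List.filter_filter]
    have h2 : gpu = present.filter (fun k => !decide (pvRank fd k = 0)) := by
      rw [hpres, List.filter_filter]
    have p1 := (PySem.List.sorted_perm cpu (fun x => x) false).append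
      (PySem.List.sorted_perm gpu (fun x => x) false)
    have p2 : (cpu ++ gpu).Perm present := by
      rw [h1, h2]; exact List.filter_append_perm _ present
    exact (p1.trans p2).trans (PySem.List.sorted_perm present (pvKey fd) false).symm
  · -- pairwise on A's side
    rw [List.pairwise_append]
    refine ⟨?_, ?_, ?_⟩
    · refine (PySem.List.sorted_pairwise cpu (fun x => x)).imp_of_mem ?_
      intro a b ha hb hle
      have ha0 := rank_of_mem_cpu fd dk a ((PySem.List.mem_sorted _ _ _ _).1 ha)
      have hb0 := rank_of_mem_cpu fd dk b ((PySem.List.mem_sorted _ _ _ _).1 hb)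
      simp only [pvKey, Prod.Lex.toLex_le_toLex]
      right; exact ⟨by rw [ha0, hb0], hle⟩
    · refine (PySem.List.sorted_pairwise gpu (fun x => x)).imp_of_mem ?_
      intro a b ha hb hle
      have ha1 := rank_of_mem_gpu fd dk a ((PySem.List.mem_sorted _ _ _ _).1 ha)
      have hb1 := rank_of_mem_gpu fd dk b ((PySem.List.mem_sorted _ _ _ _).1 hb)
      simp only [pvKey, Prod.Lex.toLex_le_toLex]
      right; exact ⟨by rw [ha1, hb1], hle⟩
    · intro a ha b hb
      have ha0 := rank_of_mem_cpu fd dk a ((PySem.List.mem_sorted _ _ _ _).1 ha)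
      have hb1 := rank_of_mem_gpu fd dk b ((PySem.List.mem_sorted _ _ _ _).1 hb)
      simp only [pvKey, Prod.Lex.toLex_le_toLex]
      left; rw [ha0, hb1]; norm_num
  · -- pairwise on B's side
    exact PySem.List.sorted_pairwise present (pvKey fd)
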